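-- pv_equiv track=rewrite | github.com/GitPistachio/Competitive-programming | Contests/LTIME84B - May Lunchtime 2020 Division 2/WWALK - Weird Walk/Weird Walk.py | weirdDistance
-- ===== SOURCE A (Python) =====
-- def weirdDistance(n, A, B):
--     """Calculate weird distance."""
--     werid_dist = 0
--     walk_dist_by_a = 0
--     walk_dist_by_b = 0
--
--     for i in range(n):
--         if walk_dist_by_a == walk_dist_by_b and A[i] == B[i]:
--             werid_dist += A[i]
--
--         walk_dist_by_a += A[i]
--         walk_dist_by_b += B[i]
--
--     return werid_dist
-- ===== SOURCE B (Python) =====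
-- def weirdDistance(n, A, B):
--     """Calculate weird distance."""
--     # D[k] = sum(A[:k]) - sum(B[:k]) is the difference walk; PA[k] = sum(A[:k]).
--     D = [0]
--     PA = [0]
--     for i in range(n):
--         D.append(D[-1] + A[i] - B[i])
--         PA.append(PA[-1] + A[i])
--     # Step i is counted exactly when the difference walk is at 0 both before
--     # and after the step (D[i] == 0 == D[i+1]); there is no need to compare
--     # A[i] with B[i].  Scan D for maximal runs of zeros and add each run's
--     # whole block of A at once via the prefix sums PA.
--     total = 0
--     k = 0
--     while k <= n:
--         if D[k] == 0:
--             j = k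
--             while j + 1 <= n and D[j + 1] == 0:
--                 j += 1
--             total += PA[j] - PA[k]
--             k = j + 1
--         else:
--             k += 1
--     return total
-- ===== Notes on version B (the rewrite author's own statement) =====
-- stated objective: alternative
-- what changed: B never compares A[i] with B[i]: it characterizes a counted step as a zero-to-zero step of the difference walk D (prefix sums of A-B), scans D for maximal runs of zeros with a nested two-pointer while loop, and adds each run's whole block of A at once as a difference of A's prefix sums.
import Mathlib
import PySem

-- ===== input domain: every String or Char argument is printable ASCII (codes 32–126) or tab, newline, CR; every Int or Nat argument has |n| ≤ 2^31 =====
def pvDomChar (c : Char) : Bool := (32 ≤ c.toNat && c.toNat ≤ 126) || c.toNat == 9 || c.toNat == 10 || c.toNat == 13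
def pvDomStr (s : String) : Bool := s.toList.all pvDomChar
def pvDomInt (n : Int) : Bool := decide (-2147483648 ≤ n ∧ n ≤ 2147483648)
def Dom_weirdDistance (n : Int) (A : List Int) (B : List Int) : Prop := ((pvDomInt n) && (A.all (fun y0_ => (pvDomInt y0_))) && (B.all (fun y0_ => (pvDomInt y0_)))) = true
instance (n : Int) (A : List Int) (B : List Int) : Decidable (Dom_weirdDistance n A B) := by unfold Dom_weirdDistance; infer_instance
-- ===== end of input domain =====

-- B never compares A[i] with B[i]: it characterizes counted steps as zero-to-zero steps of
-- the difference walk and scans its prefix array for maximal zero runs, adding each run's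
-- block of A via A's prefix sums (alternative algorithm, same asymptotic cost).


-- ===== PORT A =====
def stepA (A B : List Int) (st : Int × Int × Int) (i : Int) : Int × Int × Int :=
  let wd := if st.2.1 = st.2.2 ∧ PySem.List.pyGetD A i 0 = PySem.List.pyGetD B i 0
            then st.1 + PySem.List.pyGetD A i 0 else st.1
  (wd, st.2.1 + PySem.List.pyGetD A i 0, st.2.2 + PySem.List.pyGetD B i 0)

def weirdDistance (n : Int) (A : List Int) (B : List Int) : Int :=
  ((PySem.List.pyRange 0 n 1).foldl (stepA A B) (0, 0, 0)).1

-- ===== PORT B =====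
-- table-building loop: one fold appending to both D and PA, exactly as in Source B
def stepDP (A B : List Int) (st : List Int × List Int) (i : Int) : List Int × List Int :=
  (st.1 ++ [PySem.List.pyGetD st.1 (-1) 0 + PySem.List.pyGetD A i 0 - PySem.List.pyGetD B i 0],
   st.2 ++ [PySem.List.pyGetD st.2 (-1) 0 + PySem.List.pyGetD A i 0])

-- inner 'while j + 1 <= n and D[j+1] == 0: j += 1' (fuel only makes it total)
def pvInner (n : Int) (D : List Int) : Nat → Int → Int
  | 0, j => j
  | fuel+1, j =>
      if j + 1 ≤ n ∧ PySem.List.pyGetD D (j+1) 0 = 0 then pvInner n D fuel (j+1) else j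

-- outer 'while k <= n' run-scanning loop (fuel only makes it total)
def pvRun (n : Int) (D PA : List Int) : Nat → Int → Int → Int
  | 0, _, total => total
  | fuel+1, k, total =>
      if k ≤ n then
        if PySem.List.pyGetD D k 0 = 0 then
          let j := pvInner n D (n.toNat + 2) k
          pvRun n D PA fuel (j+1) (total + PySem.List.pyGetD PA j 0 - PySem.List.pyGetD PA k 0)
        else pvRun n D PA fuel (k+1) total
      else total

def weirdDistance_alt (n : Int) (A : List Int) (B : List Int) : Int :=
  let st := (PySem.List.pyRange 0 n 1).foldl (stepDP A B) ([0], [0])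
  pvRun n st.1 st.2 (n.toNat + 2) 0 0

-- ===== PRECONDITION & SPEC =====
-- Pre_ excludes exactly the inputs where Python A raises IndexError (n larger than a list).
def Pre_weirdDistance (n : Int) (A : List Int) (B : List Int) : Prop :=
  n ≤ (A.length : Int) ∧ n ≤ (B.length : Int)
instance (n : Int) (A : List Int) (B : List Int) : Decidable (Pre_weirdDistance n A B) := by
  unfold Pre_weirdDistance; infer_instance

def pvWitness_weirdDistance : Int × List Int × List Int := (3, ([1, 2, 3], [1, 5, 3]))

def Spec_weirdDistance (n : Int) (A : List Int) (B : List Int) (out : Int) : Prop := out = weirdDistance_alt n A B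
instance (n : Int) (A : List Int) (B : List Int) (out : Int) : Decidable (Spec_weirdDistance n A B out) := by unfold Spec_weirdDistance; infer_instance

-- ===== CLAIM (what is proved, stated in full; the proofs are below) =====
def Claim_equal_weirdDistance : Prop := ∀ (n : Int) (A : List Int) (B : List Int), Dom_weirdDistance n A B → Pre_weirdDistance n A B → Spec_weirdDistance n A B (weirdDistance n A B)

-- ===== LEMMAS AND PROOFS =====
-- pvG X i = defaulted read X[i]; pvS X b = exclusive prefix sum; pvD = difference walk;
-- pvW = A's running answer; pvT = the run-region sum B is shown to compute.
def pvG (X : List Int) (i : Int) : Int := PySem.List.pyGetD X i 0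
def pvS (X : List Int) (b : Int) : Int :=
  ((PySem.List.pyRange 0 b 1).map (fun i => pvG X i)).sum
def pvD (A B : List Int) (i : Int) : Int := pvS A i - pvS B i
def pvW (A B : List Int) (b : Int) : Int :=
  ((PySem.List.pyRange 0 b 1).map
    (fun i => if pvS A i = pvS B i ∧ pvG A i = pvG B i then pvG A i else 0)).sum
def pvT (A B : List Int) (m k : Nat) : Int :=
  ∑ i ∈ Finset.Ico k m,
    (if pvD A B (i : Int) = 0 ∧ pvD A B ((i : Int) + 1) = 0 then pvG A (i : Int) else 0)

theorem pvS_zero (X : List Int) : pvS X 0 = 0 := by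
  simp [pvS, PySem.List.pyRange_one_eq_nil le_rfl]

theorem pvS_succ (X : List Int) (m : Nat) : pvS X ((m : Int) + 1) = pvS X m + pvG X m := by
  unfold pvS
  rw [PySem.List.pyRange_one_succ_right (by positivity)]
  simp

theorem pvW_succ (A B : List Int) (m : Nat) :
    pvW A B ((m : Int) + 1) =
      pvW A B m + (if pvS A m = pvS B m ∧ pvG A m = pvG B m then pvG A m else 0) := by
  unfold pvW
  rw [PySem.List.pyRange_one_succ_right (by positivity)]
  simp

theorem foldA_eq (A B : List Int) (m : Nat) :
    (PySem.List.pyRange 0 (m : Int) 1).foldl (stepA A B) (0, 0, 0) =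
      (pvW A B m, pvS A m, pvS B m) := by
  induction m with
  | zero => simp [PySem.List.pyRange_one_eq_nil le_rfl, pvS_zero, pvW]
  | succ m ih =>
      have hc : ((m + 1 : Nat) : Int) = (m : Int) + 1 := by push_cast; ring
      rw [hc, PySem.List.pyRange_one_succ_right (by positivity), List.foldl_append, ih]
      simp only [List.foldl, stepA, pvS_succ, pvW_succ, pvG]
      split_ifs <;> simp

-- the table-building fold produces the maps of pvD and pvS A over 0..m
theorem foldDP_eq (A B : List Int) (m : Nat) :
    (PySem.List.pyRange 0 (m : Int) 1).foldl (stepDP A B) ([0], [0]) =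
      ((PySem.List.pyRange 0 ((m : Int) + 1) 1).map (fun j => pvD A B j),
       (PySem.List.pyRange 0 ((m : Int) + 1) 1).map (fun j => pvS A j)) := by
  induction m with
  | zero =>
      rw [Nat.cast_zero, PySem.List.pyRange_one_eq_nil le_rfl, PySem.List.pyRange_one_singleton]
      simp [pvD, pvS_zero]
  | succ m ih =>
      have hc : ((m + 1 : Nat) : Int) = (m : Int) + 1 := by push_cast; ring
      rw [hc, PySem.List.pyRange_one_succ_right (by positivity), List.foldl_append, ih]
      simp only [List.foldl, stepDP]
      rw [show (m : Int) + 1 + 1 = ((m : Int) + 1) + 1 by ring,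
        PySem.List.pyRange_one_succ_right (a := 0) (b := (m : Int) + 1) (by positivity),
        List.map_append, List.map_append]
      rw [PySem.List.pyRange_one_succ_right (a := 0) (b := (m : Int)) (by positivity),
        List.map_append, List.map_append]
      simp [PySem.List.pyGetD_neg_one_append_singleton, pvD, pvS_succ, pvG]
      ring

theorem pvS_eq_sum (X : List Int) (m : Nat) :
    pvS X (m : Int) = ∑ i ∈ Finset.range m, pvG X (i : Int) := by
  induction m with
  | zero => simpa using pvS_zero X
  | succ m ih =>
      have hc : ((m + 1 : Nat) : Int) = (m : Int) + 1 := by push_cast; ring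
      rw [hc, pvS_succ, Finset.sum_range_succ, ih]

theorem telescope (A : List Int) (k j : Nat) (h : k ≤ j) :
    ∑ i ∈ Finset.Ico k j, pvG A (i : Int) = pvS A (j : Int) - pvS A (k : Int) := by
  rw [pvS_eq_sum, pvS_eq_sum, Finset.sum_Ico_eq_sub _ h]

-- characterization of the inner while loop: it returns the end j of the maximal zero
-- run of d starting at k (d is the abstract content of the list Dl on 0..m)
theorem pvInner_spec (Dl : List Int) (d : Nat → Int) (m : Nat)
    (hD : ∀ i : Nat, i ≤ m → PySem.List.pyGetD Dl (i : Int) 0 = d i) :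
    ∀ (fuel : Nat) (k : Nat), k ≤ m → m - k ≤ fuel →
      ∃ j : Nat, pvInner (m : Int) Dl fuel (k : Int) = (j : Int) ∧ k ≤ j ∧ j ≤ m ∧
        (∀ i : Nat, k < i → i ≤ j → d i = 0) ∧ (j = m ∨ d (j + 1) ≠ 0) := by
  intro fuel
  induction fuel with
  | zero =>
      intro k hk hf
      have hkm : k = m := by omega
      exact ⟨k, rfl, le_rfl, hk, fun i h1 h2 => absurd (lt_of_lt_of_le h1 h2) (lt_irrefl _), Or.inl hkm⟩
  | succ fuel ih =>
      intro k hk hf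
      by_cases hc : (k : Int) + 1 ≤ (m : Int) ∧ PySem.List.pyGetD Dl ((k : Int) + 1) 0 = 0
      · have hk1 : k + 1 ≤ m := by exact_mod_cast hc.1
        have hd1 : d (k + 1) = 0 := by
          have := hD (k + 1) hk1
          rw [← this]; exact_mod_cast hc.2
        obtain ⟨j, hj, hkj, hjm, hz, hb⟩ := ih (k + 1) hk1 (by omega)
        refine ⟨j, ?_, by omega, hjm, ?_, hb⟩
        · simp only [pvInner, hc]
          rw [← hj]; norm_num
        · intro i h1 h2
          rcases Nat.lt_or_ge k.succ i with h | h
          · exact hz i h h2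
          · have : i = k + 1 := by omega
            subst this; exact hd1
      · refine ⟨k, ?_, le_rfl, hk, fun i h1 h2 => absurd (lt_of_lt_of_le h1 h2) (lt_irrefl _), ?_⟩
        · simp only [pvInner, hc, if_false]
        · rcases Nat.lt_or_ge k m with h | h
          · right
            intro hdz
            apply hc
            constructor
            · exact_mod_cast Nat.succ_le_of_lt h
            · have := hD (k + 1) (Nat.succ_le_of_lt h)
              rw [show ((k : Int) + 1) = ((k + 1 : Nat) : Int) by push_cast; ring, this]
              exact hdz
          · left; omega

-- splitting the run-region sum at the end of a maximal zero run
theorem pvT_split (A B : List Int) (m k j : Nat)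
    (hkj : k ≤ j) (hjm : j ≤ m) (hk0 : pvD A B (k : Int) = 0)
    (hz : ∀ i : Nat, k < i → i ≤ j → pvD A B (i : Int) = 0)
    (hb : j = m ∨ pvD A B ((j + 1 : Nat) : Int) ≠ 0) :
    pvT A B m k = (pvS A (j : Int) - pvS A (k : Int)) + pvT A B m (j + 1) := by
  have hall : ∀ i : Nat, k ≤ i → i ≤ j → pvD A B (i : Int) = 0 := by
    intro i h1 h2
    rcases Nat.lt_or_ge k i with h | h
    · exact hz i h h2
    · have : i = k := by omega
      subst this; exact hk0
  have hterm : ∀ i : Nat, k ≤ i → i + 1 ≤ j →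
      (if pvD A B (i : Int) = 0 ∧ pvD A B ((i : Int) + 1) = 0 then pvG A (i : Int) else 0)
        = pvG A (i : Int) := by
    intro i h1 h2
    have e1 : pvD A B (i : Int) = 0 := hall i h1 (by omega)
    have e2 : pvD A B ((i : Int) + 1) = 0 := by
      have := hall (i + 1) (by omega) h2
      rw [← this]; norm_cast
    simp [e1, e2]
  rcases Nat.eq_or_lt_of_le hjm with rfl | hlt
  · -- j = m : the run reaches the end; the tail sum is empty
    have h1 : pvT A B j (j + 1) = 0 := by
      unfold pvT
      rw [Finset.Ico_eq_empty (by omega)]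
      simp
    have h2 : pvT A B j k = ∑ i ∈ Finset.Ico k j, pvG A (i : Int) := by
      unfold pvT
      refine Finset.sum_congr rfl ?_
      intro i hi
      rw [Finset.mem_Ico] at hi
      exact hterm i hi.1 (by omega)
    rw [h1, h2, telescope A k j hkj]
    ring
  · -- j < m : D[j+1] ≠ 0 ends the run
    have hbne : pvD A B ((j + 1 : Nat) : Int) ≠ 0 := by
      rcases hb with h | h
      · omega
      · exact h
    unfold pvT
    rw [← Finset.sum_Ico_consecutive _ (by omega : k ≤ j + 1) (by omega : j + 1 ≤ m)]
    have hsplit : ∑ i ∈ Finset.Ico k (j + 1),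
        (if pvD A B (i : Int) = 0 ∧ pvD A B ((i : Int) + 1) = 0 then pvG A (i : Int) else 0)
        = pvS A (j : Int) - pvS A (k : Int) := by
      rw [Finset.sum_Ico_succ_top hkj]
      have hj0 : (if pvD A B (j : Int) = 0 ∧ pvD A B ((j : Int) + 1) = 0 then pvG A (j : Int) else 0) = 0 := by
        have : pvD A B ((j : Int) + 1) ≠ 0 := by
          intro h; apply hbne; rw [← h]; norm_cast
        simp [this]
      rw [hj0, add_zero]
      rw [show (∑ i ∈ Finset.Ico k j,
            (if pvD A B (i : Int) = 0 ∧ pvD A B ((i : Int) + 1) = 0 then pvG A (i : Int) else 0))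
          = ∑ i ∈ Finset.Ico k j, pvG A (i : Int) from
        Finset.sum_congr rfl (fun i hi => by
          rw [Finset.mem_Ico] at hi
          exact hterm i hi.1 (by omega))]
      exact telescope A k j hkj
    rw [hsplit]

-- the outer run-scanning loop computes the run-region sum
theorem pvRun_eq (A B Dl PAl : List Int) (m : Nat)
    (hD : ∀ i : Nat, i ≤ m → PySem.List.pyGetD Dl (i : Int) 0 = pvD A B (i : Int))
    (hP : ∀ i : Nat, i ≤ m → PySem.List.pyGetD PAl (i : Int) 0 = pvS A (i : Int)) :
    ∀ (fuel : Nat) (k : Nat) (total : Int), m + 1 - k ≤ fuel →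
      pvRun (m : Int) Dl PAl fuel (k : Int) total = total + pvT A B m k := by
  intro fuel
  induction fuel with
  | zero =>
      intro k total hf
      have hkm : m < k := by omega
      unfold pvT
      rw [Finset.Ico_eq_empty (by omega)]
      simp [pvRun]
  | succ fuel ih =>
      intro k total hf
      by_cases hkm : (k : Int) ≤ (m : Int)
      · have hkm' : k ≤ m := by exact_mod_cast hkm
        by_cases hz : PySem.List.pyGetD Dl (k : Int) 0 = 0
        · have hk0 : pvD A B (k : Int) = 0 := by rw [← hD k hkm']; exact hz
          obtain ⟨j, hj, hkj, hjm, hzr, hb⟩ :=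
            pvInner_spec Dl (fun i => pvD A B (i : Int)) m hD ((m : Int).toNat + 2) k hkm' (by omega)
          simp only [pvRun, hkm, hz, if_true]
          rw [hj]
          rw [show ((j : Int) + 1) = ((j + 1 : Nat) : Int) by push_cast; ring]
          rw [hP j hjm, hP k hkm']
          rw [ih (j + 1) (total + pvS A (j : Int) - pvS A (k : Int)) (by omega)]
          rw [pvT_split A B m k j hkj hjm hk0 hzr hb]
          ring
        · have hkne : pvD A B (k : Int) ≠ 0 := by rw [← hD k hkm']; exact hz
          simp only [pvRun, hkm, hz, if_true, if_false]
          rw [show ((k : Int) + 1) = ((k + 1 : Nat) : Int) by push_cast; ring]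
          rw [ih (k + 1) total (by omega)]
          congr 1
          unfold pvT
          rcases Nat.lt_or_ge k m with h | h
          · rw [Finset.sum_eq_sum_Ico_succ_bot h]
            simp [hkne]
          · rw [Finset.Ico_eq_empty (by omega), Finset.Ico_eq_empty (by omega)]
      · simp only [pvRun, hkm, if_false]
        unfold pvT
        rw [Finset.Ico_eq_empty (by omega : ¬ k < m)]
        simp

-- A's answer is the run-region sum over the whole range
theorem pvW_eq_pvT (A B : List Int) (m : Nat) : pvW A B (m : Int) = pvT A B m 0 := by
  induction m with
  | zero =>
      unfold pvT
      simp [pvW, PySem.List.pyRange_one_eq_nil le_rfl]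
  | succ m ih =>
      have hc : ((m + 1 : Nat) : Int) = (m : Int) + 1 := by push_cast; ring
      rw [hc, pvW_succ]
      unfold pvT
      rw [show Finset.Ico 0 (m + 1) = Finset.range (m + 1) from congrFun (Finset.range_eq_Ico).symm (m + 1),
        Finset.sum_range_succ]
      unfold pvT at ih
      rw [show Finset.Ico 0 m = Finset.range m from congrFun (Finset.range_eq_Ico).symm m] at ih
      rw [ih]
      congr 1
      have hDsucc : pvD A B ((m : Int) + 1) = pvD A B (m : Int) + (pvG A (m : Int) - pvG B (m : Int)) := by
        unfold pvD
        rw [pvS_succ, pvS_succ]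
        ring
      have hiff : (pvS A (m : Int) = pvS B (m : Int) ∧ pvG A (m : Int) = pvG B (m : Int)) ↔
          (pvD A B (m : Int) = 0 ∧ pvD A B ((m : Int) + 1) = 0) := by
        rw [hDsucc]
        unfold pvD
        constructor
        · rintro ⟨h1, h2⟩; constructor <;> omega
        · rintro ⟨h1, h2⟩; constructor <;> omega
      by_cases h : pvS A (m : Int) = pvS B (m : Int) ∧ pvG A (m : Int) = pvG B (m : Int)
      · rw [if_pos h, if_pos (hiff.mp h)]
      · rw [if_neg h, if_neg (fun hc2 => h (hiff.mpr hc2))]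

theorem weirdDistance_eq_alt (n : Int) (A B : List Int) :
    weirdDistance n A B = weirdDistance_alt n A B := by
  by_cases hn : 0 ≤ n
  · obtain ⟨m, rfl⟩ : ∃ m : Nat, n = (m : Int) := ⟨n.toNat, (Int.toNat_of_nonneg hn).symm⟩
    unfold weirdDistance weirdDistance_alt
    rw [foldA_eq, foldDP_eq]
    have hD : ∀ i : Nat, i ≤ m →
        PySem.List.pyGetD ((PySem.List.pyRange 0 ((m : Int) + 1) 1).map (fun j => pvD A B j)) (i : Int) 0
          = pvD A B (i : Int) := by
      intro i hi
      exact PySem.List.pyGetD_map_pyRange_of_nonneg _ ((m : Int) + 1) (i : Int) 0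
        (by positivity) (by omega)
    have hP : ∀ i : Nat, i ≤ m →
        PySem.List.pyGetD ((PySem.List.pyRange 0 ((m : Int) + 1) 1).map (fun j => pvS A j)) (i : Int) 0
          = pvS A (i : Int) := by
      intro i hi
      exact PySem.List.pyGetD_map_pyRange_of_nonneg _ ((m : Int) + 1) (i : Int) 0
        (by positivity) (by omega)
    have h0 : ((0 : Nat) : Int) = (0 : Int) := rfl
    have := pvRun_eq A B _ _ m hD hP ((m : Int).toNat + 2) 0 0 (by omega)
    rw [h0] at this
    simp only [this]
    rw [pvW_eq_pvT]
    ring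
  · have h : PySem.List.pyRange 0 n 1 = [] := PySem.List.pyRange_one_eq_nil (by omega)
    have hfuel : n.toNat + 2 = 2 := by omega
    simp [weirdDistance, weirdDistance_alt, h, pvRun, hn]

-- ===== VERDICT (by name: the statement is the Claim_ definition above) =====
theorem weirdDistance_spec : Claim_equal_weirdDistance := by
  intro n A B _ _
  exact weirdDistance_eq_alt n A B
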